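-- pv_equiv track=rewrite | github.com/pmmmz/abki-ccs26-artifact | joint_decoding.py | label_word
-- ===== SOURCE A (Python) =====
-- from typing import List, Dict, Tuple, Hashable, Optional
--
-- def label_word(word: str,
--                existing_labels: Dict[str, str] = None,
--                next_id: int = 1) -> Tuple[List[str], Dict[str, str], int]:
--     if existing_labels is None:
--         existing_labels = {}
--     labs = []
--     for ch in word:
--         if ch not in existing_labels:
--             existing_labels[ch] = f"L{next_id}"
--             next_id += 1
--         labs.append(existing_labels[ch])
--     return labs, existing_labels, next_id
-- ===== SOURCE B (Python) =====
-- def label_word(word, existing_labels=None, next_id=1):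
--     if existing_labels is None:
--         existing_labels = {}
--     # fresh chars in first-appearance order; label of the i-th is next_id + i (closed form, no running counter)
--     fresh = [ch for ch in dict.fromkeys(word) if ch not in existing_labels]
--     existing_labels.update((ch, f"L{next_id + i}") for i, ch in enumerate(fresh))
--     return [existing_labels[ch] for ch in word], existing_labels, next_id + len(fresh)
-- ===== Notes on version B (the rewrite author's own statement) =====
-- stated objective: alternative
-- what changed: A runs one interleaved loop that mutates the dict and a running counter while emitting labels; B first computes the ordered set of fresh characters (dedup + filter), assigns each its label by the closed form next_id+i via enumerate in one bulk update, and derives the returned counter as next_id+len(fresh).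
import Mathlib
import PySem

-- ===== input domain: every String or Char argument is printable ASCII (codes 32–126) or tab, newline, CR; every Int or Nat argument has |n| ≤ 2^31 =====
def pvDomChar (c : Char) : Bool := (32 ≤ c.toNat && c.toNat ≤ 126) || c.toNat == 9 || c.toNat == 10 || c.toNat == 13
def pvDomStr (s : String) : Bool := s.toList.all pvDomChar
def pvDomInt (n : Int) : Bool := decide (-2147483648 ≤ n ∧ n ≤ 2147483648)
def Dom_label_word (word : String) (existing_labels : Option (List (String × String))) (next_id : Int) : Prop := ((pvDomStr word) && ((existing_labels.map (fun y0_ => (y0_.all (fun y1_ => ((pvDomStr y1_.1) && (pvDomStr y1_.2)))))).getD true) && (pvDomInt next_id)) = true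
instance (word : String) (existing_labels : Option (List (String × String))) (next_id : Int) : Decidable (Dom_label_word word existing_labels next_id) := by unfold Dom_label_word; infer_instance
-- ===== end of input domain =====

-- B replaces A's interleaved loop (dict + running counter + output in one pass) by:
-- ordered dedup, filter, closed-form labels next_id+i via enumerate in one bulk update,
-- and next_id + len(fresh) (objective: alternative). Both mutate the passed dict in
-- place in Python; the theorem is about the return value (identical items anyway).

-- ===== PORT A =====
-- A's single loop: carries (labs, dict, next_id)
def awLoop (l : List Char) (labs : List String) (d : PySem.Dict String String) (n : Int) :
    List String × PySem.Dict String String × Int :=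
  match l with
  | [] => (labs, d, n)
  | c :: cs =>
    let s := String.ofList [c]
    if d.contains s then
      awLoop cs (labs ++ [d.getD s ""]) d n
    else
      let d' := d.insert s ("L" ++ PySem.Int.toStr n)
      awLoop cs (labs ++ [d'.getD s ""]) d' (n + 1)

def label_word (word : String) (existing_labels : Option (List (String × String))) (next_id : Int) : List String × (List (String × String)) × Int :=
  let d := PySem.Dict.mk (existing_labels.getD [])
  let r := awLoop word.toList [] d next_id
  (r.1, r.2.1.items, r.2.2)

-- ===== PORT B =====
-- dict.fromkeys(word): first-occurrence order dedup
def bDedup (l : List Char) (acc : List Char) : List Char :=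
  match l with
  | [] => acc
  | c :: cs => if acc.contains c then bDedup cs acc else bDedup cs (acc ++ [c])

def label_word_alt (word : String) (existing_labels : Option (List (String × String))) (next_id : Int) : List String × (List (String × String)) × Int :=
  let d := PySem.Dict.mk (existing_labels.getD [])
  -- fresh = [ch for ch in dict.fromkeys(word) if ch not in existing_labels]
  let fresh := (bDedup word.toList []).filter (fun c => !(d.contains (String.ofList [c])))
  -- existing_labels.update((ch, f"L{next_id + i}") for i, ch in enumerate(fresh))
  let d' := (PySem.List.enumerate fresh).foldl
      (fun dd p => dd.insert (String.ofList [p.2]) ("L" ++ PySem.Int.toStr (next_id + p.1))) d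
  (word.toList.map (fun c => d'.getD (String.ofList [c]) ""), d'.items, next_id + fresh.length)

-- ===== PRECONDITION & SPEC =====
def Spec_label_word (word : String) (existing_labels : Option (List (String × String))) (next_id : Int) (out : List String × (List (String × String)) × Int) : Prop := out = label_word_alt word existing_labels next_id
instance (word : String) (existing_labels : Option (List (String × String))) (next_id : Int) (out : List String × (List (String × String)) × Int) : Decidable (Spec_label_word word existing_labels next_id out) := by unfold Spec_label_word; infer_instance

-- ===== CLAIM (what is proved, stated in full; the proofs are below) =====
def Claim_equal_label_word : Prop := ∀ (word : String) (existing_labels : Option (List (String × String))) (next_id : Int), Dom_label_word word existing_labels next_id → Spec_label_word word existing_labels next_id (label_word word existing_labels next_id)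

-- ===== LEMMAS AND PROOFS =====

-- the fresh characters of l w.r.t. dict d, in first-appearance order (proof-side spec)
def freshRec (l : List Char) (d : PySem.Dict String String) : List Char :=
  match l with
  | [] => []
  | c :: cs =>
    if d.contains (String.ofList [c]) then freshRec cs d
    else c :: freshRec cs (d.insert (String.ofList [c]) "")

-- insert the fresh chars with labels L n, L (n+1), … (proof-side spec of the final dict)
def finAux (fr : List Char) (d : PySem.Dict String String) (n : Int) : PySem.Dict String String :=
  match fr with
  | [] => d
  | c :: cs => finAux cs (d.insert (String.ofList [c]) ("L" ++ PySem.Int.toStr n)) (n + 1)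

theorem mk_single_inj {a b : Char} (h : String.ofList [a] = String.ofList [b]) : a = b := by
  have h2 : (String.ofList [a]).toList = (String.ofList [b]).toList := congrArg String.toList h
  simp at h2
  exact h2

theorem freshRec_congr (l : List Char) (d₁ d₂ : PySem.Dict String String)
    (h : ∀ k, d₁.contains k = d₂.contains k) : freshRec l d₁ = freshRec l d₂ := by
  induction l generalizing d₁ d₂ with
  | nil => rfl
  | cons c cs ih =>
    simp only [freshRec, h]
    by_cases hc : d₂.contains (String.ofList [c]) = true
    · simp only [hc, if_true]; exact ih d₁ d₂ h
    · simp only [Bool.not_eq_true] at hc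
      simp only [hc, Bool.false_eq_true, if_false]
      have := ih (d₁.insert (String.ofList [c]) "") (d₂.insert (String.ofList [c]) "")
        (fun k => by simp [PySem.Dict.contains_insert, h])
      simp [this]

theorem freshRec_not_contains (l : List Char) (d : PySem.Dict String String)
    (x : Char) (hx : x ∈ freshRec l d) : d.contains (String.ofList [x]) = false := by
  induction l generalizing d with
  | nil => simp [freshRec] at hx
  | cons c cs ih =>
    simp only [freshRec] at hx
    by_cases hc : d.contains (String.ofList [c]) = true
    · simp only [hc, if_true] at hx; exact ih d hx
    · simp only [Bool.not_eq_true] at hc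
      simp only [hc, Bool.false_eq_true, if_false, List.mem_cons] at hx
      rcases hx with rfl | hx
      · exact hc
      · have := ih _ hx
        rw [PySem.Dict.contains_insert] at this
        simp only [Bool.or_eq_false_iff] at this
        exact this.2

theorem finAux_getD (fr : List Char) (d : PySem.Dict String String) (n : Int)
    (k : String) (hk : ∀ x ∈ fr, String.ofList [x] ≠ k) :
    (finAux fr d n).getD k "" = d.getD k "" := by
  induction fr generalizing d n with
  | nil => rfl
  | cons c cs ih =>
    simp only [finAux]
    rw [ih _ _ (fun x hx => hk x (List.mem_cons_of_mem _ hx)), PySem.Dict.getD_insert,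
        if_neg (fun he => hk c List.mem_cons_self he.symm)]

-- B's enumerate fold computes finAux
theorem enumFold_eq_finAux (fr : List Char) (d : PySem.Dict String String) (n s : Int) :
    (PySem.List.enumerate fr s).foldl
      (fun dd p => dd.insert (String.ofList [p.2]) ("L" ++ PySem.Int.toStr (n + p.1))) d
    = finAux fr d (n + s) := by
  induction fr generalizing d s with
  | nil => rfl
  | cons c cs ih =>
    rw [PySem.List.enumerate_cons, List.foldl_cons, ih, finAux]
    ring_nf

-- A's loop computes finAux over freshRec plus the map through the finished table
theorem awLoop_eq (l : List Char) (labs : List String) (d : PySem.Dict String String) (n : Int) :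
    awLoop l labs d n =
      (labs ++ l.map (fun c => (finAux (freshRec l d) d n).getD (String.ofList [c]) ""),
       finAux (freshRec l d) d n, n + (freshRec l d).length) := by
  induction l generalizing labs d n with
  | nil => simp [awLoop, freshRec, finAux]
  | cons c cs ih =>
    simp only [awLoop, freshRec]
    by_cases h : d.contains (String.ofList [c]) = true
    · simp only [h, if_true]
      rw [ih]
      have hne : ∀ x ∈ freshRec cs d, String.ofList [x] ≠ String.ofList [c] := by
        intro x hx he
        have := freshRec_not_contains cs d x hx
        rw [he, h] at this; exact Bool.true_eq_false.mp this
      have hget : (finAux (freshRec cs d) d n).getD (String.ofList [c]) "" = d.getD (String.ofList [c]) "" :=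
        finAux_getD _ _ _ _ hne
      simp [hget, List.append_assoc]
    · simp only [Bool.not_eq_true] at h
      simp only [h, Bool.false_eq_true, if_false]
      rw [ih]
      have hkeys : ∀ k, (d.insert (String.ofList [c]) ("L" ++ PySem.Int.toStr n)).contains k
          = (d.insert (String.ofList [c]) "").contains k := by
        intro k; simp [PySem.Dict.contains_insert]
      have hfr : freshRec cs (d.insert (String.ofList [c]) ("L" ++ PySem.Int.toStr n))
          = freshRec cs (d.insert (String.ofList [c]) "") := freshRec_congr _ _ _ hkeys
      set d' := d.insert (String.ofList [c]) ("L" ++ PySem.Int.toStr n) with hd'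
      have hne : ∀ x ∈ freshRec cs d', String.ofList [x] ≠ String.ofList [c] := by
        intro x hx he
        have := freshRec_not_contains cs d' x hx
        rw [he, hd', PySem.Dict.contains_insert_self] at this
        exact Bool.true_eq_false.mp this
      have hget : (finAux (freshRec cs d') d' (n + 1)).getD (String.ofList [c]) ""
          = "L" ++ PySem.Int.toStr n := by
        rw [finAux_getD _ _ _ _ hne, hd', PySem.Dict.getD_insert_self]
      have hgd : d'.getD (String.ofList [c]) "" = "L" ++ PySem.Int.toStr n := by
        rw [hd', PySem.Dict.getD_insert_self]
      have hfin : finAux (c :: freshRec cs d') d n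
          = finAux (freshRec cs d') d' (n + 1) := by
        rw [finAux, ← hd']
      rw [hgd, ← hfr, hfin]
      refine Prod.ext ?_ (Prod.ext rfl ?_)
      · simp [hget, List.append_assoc]
      · simp only [List.length_cons]
        push_cast
        omega

-- dedup-then-filter computes freshRec (invariant: current dict keys = acc chars ∪ original keys)
theorem bDedup_filter_eq (l acc : List Char) (d d₀ : PySem.Dict String String)
    (H : ∀ x : Char, d.contains (String.ofList [x]) = (acc.contains x || d₀.contains (String.ofList [x]))) :
    (bDedup l acc).filter (fun c => !(d₀.contains (String.ofList [c])))
      = acc.filter (fun c => !(d₀.contains (String.ofList [c]))) ++ freshRec l d := by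
  induction l generalizing acc d with
  | nil => simp [bDedup, freshRec]
  | cons c cs ih =>
    simp only [bDedup, freshRec]
    by_cases ha : acc.contains c = true
    · have hd : d.contains (String.ofList [c]) = true := by rw [H, ha, Bool.true_or]
      simp only [ha, hd, if_true]
      exact ih acc d H
    · simp only [Bool.not_eq_true] at ha
      simp only [ha, Bool.false_eq_true, if_false]
      by_cases h0 : d₀.contains (String.ofList [c]) = true
      · have hd : d.contains (String.ofList [c]) = true := by rw [H, h0]; simp
        simp only [hd, if_true]
        have H' : ∀ x : Char, d.contains (String.ofList [x])
            = ((acc ++ [c]).contains x || d₀.contains (String.ofList [x])) := by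
          intro x
          by_cases hx : x = c
          · subst hx; simp [hd, h0]
          · rw [H]
            simp [hx]
        rw [ih (acc ++ [c]) d H']
        have : (acc ++ [c]).filter (fun c => !(d₀.contains (String.ofList [c])))
            = acc.filter (fun c => !(d₀.contains (String.ofList [c]))) := by
          simp [List.filter_append, h0]
        rw [this]
      · simp only [Bool.not_eq_true] at h0
        have hd : d.contains (String.ofList [c]) = false := by rw [H, h0, ha]; rfl
        simp only [hd, Bool.false_eq_true, if_false]
        have H' : ∀ x : Char, (d.insert (String.ofList [c]) "").contains (String.ofList [x])
            = ((acc ++ [c]).contains x || d₀.contains (String.ofList [x])) := by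
          intro x
          rw [PySem.Dict.contains_insert]
          by_cases hx : x = c
          · subst hx; simp
          · have h1 : (String.ofList [x] == String.ofList [c]) = false :=
              beq_eq_false_iff_ne.mpr (fun he => hx (mk_single_inj he))
            rw [h1, H]
            simp [hx]
        rw [ih (acc ++ [c]) _ H']
        have : (acc ++ [c]).filter (fun c => !(d₀.contains (String.ofList [c])))
            = acc.filter (fun c => !(d₀.contains (String.ofList [c]))) ++ [c] := by
          simp [List.filter_append, h0]
        rw [this]
        simp

-- ===== VERDICT (by name: the statement is the Claim_ definition above) =====
theorem label_word_spec : Claim_equal_label_word := by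
  intro word existing_labels next_id _
  unfold Spec_label_word label_word label_word_alt
  set d := PySem.Dict.mk (existing_labels.getD []) with hd
  have hfresh : (bDedup word.toList []).filter (fun c => !(d.contains (String.ofList [c])))
      = freshRec word.toList d := by
    have := bDedup_filter_eq word.toList [] d d (fun x => by simp)
    simpa using this
  have henum := enumFold_eq_finAux (freshRec word.toList d) d next_id 0
  simp only [awLoop_eq, hfresh, henum, add_zero, List.nil_append]
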